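-- pv_equiv track=rewrite | github.com/IordanisKostelidis/painters-dilemma | main.py | calculate
-- ===== SOURCE A (Python) =====
-- def get_distance_from_next_occurrence(current_index: int,
--                                       current_color: int,
--                                       colors: list[int]) -> int:
--     hops = 0
--     for index, color in enumerate(colors):
--         if index < current_index:
--             continue
--         if color == current_color:
--             return hops
--         hops += 1
--     return hops
--
-- def calculate(colors: list[int]) -> int:
--     switches = 0
--
--     first_brush = 0
--     second_brush = 0
--
--     for index, color in enumerate(colors):
--         if first_brush == 0:
--             first_brush = color
--             switches += 1
--             continue
--
--         if first_brush == color: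
--             continue
--
--         if second_brush == 0:
--             second_brush = color
--             switches += 1
--             continue
--
--         if second_brush == color:
--             continue
--
--         first_brush_distance = get_distance_from_next_occurrence(index, first_brush, colors)
--         second_brush_distance = get_distance_from_next_occurrence(index, second_brush, colors)
--
--         if first_brush_distance < second_brush_distance:
--             second_brush = color
--             switches += 1
--         else:
--             first_brush = color
--             switches += 1
--
--     return switches
-- ===== SOURCE B (Python) =====
-- def calculate(colors: list[int]) -> int:
--     n = len(colors)
--     occ = {}
--     for i, c in enumerate(colors):
--         occ.setdefault(c, []).append(i)
--
--     def next_at(i, c):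
--         # first occurrence index >= i of color c (n if none), by binary search
--         lst = occ.get(c, [])
--         lo, hi = 0, len(lst)
--         while lo < hi:
--             mid = (lo + hi) // 2
--             if lst[mid] < i:
--                 lo = mid + 1
--             else:
--                 hi = mid
--         return lst[lo] if lo < len(lst) else n
--
--     switches = 0
--     first = 0
--     second = 0
--     for i, c in enumerate(colors):
--         if first == 0:
--             first = c
--             switches += 1
--         elif first != c:
--             if second == 0:
--                 second = c
--                 switches += 1
--             elif second != c:
--                 switches += 1
--                 if next_at(i, first) < next_at(i, second):
--                     second = c
--                 else:
--                     first = c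
--     return switches
-- ===== Notes on version B (the rewrite author's own statement) =====
-- stated objective: faster
-- what changed: B precomputes per-color sorted occurrence-index lists once and finds each next occurrence by hand-written binary search (A's module imports nothing, so no bisect import), replacing A's O(n) rescan of the whole list at every brush decision.
import Mathlib
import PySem

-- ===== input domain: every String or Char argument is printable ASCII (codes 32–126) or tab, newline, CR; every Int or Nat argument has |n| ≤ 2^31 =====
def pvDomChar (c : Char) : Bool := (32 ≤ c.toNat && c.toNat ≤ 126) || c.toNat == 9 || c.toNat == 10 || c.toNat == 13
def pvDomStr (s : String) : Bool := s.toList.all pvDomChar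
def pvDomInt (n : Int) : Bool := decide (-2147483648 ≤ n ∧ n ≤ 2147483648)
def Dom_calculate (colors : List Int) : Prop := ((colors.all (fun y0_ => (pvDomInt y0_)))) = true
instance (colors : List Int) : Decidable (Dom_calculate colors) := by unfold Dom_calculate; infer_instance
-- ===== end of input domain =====

-- B replaces A's per-decision linear rescan for the next occurrence of a brush colour by
-- per-colour occurrence-index lists built once plus a binary search (O(n log n) vs O(n^2)).

-- ===== PORT A =====
-- get_distance_from_next_occurrence: loop over enumerate(colors) with accumulator `hops`,
-- early return on the first matching colour at index ≥ current_index.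
def getDistAux (currentIndex currentColor : Int) : List (Int × Int) → Int → Int
  | [], hops => hops
  | (index, color) :: rest, hops =>
    if index < currentIndex then getDistAux currentIndex currentColor rest hops
    else if color = currentColor then hops
    else getDistAux currentIndex currentColor rest (hops + 1)

def getDistanceFromNextOccurrence (currentIndex currentColor : Int) (colors : List Int) : Int :=
  getDistAux currentIndex currentColor (PySem.List.enumerate colors 0) 0

def calcAuxA (colors : List Int) : List (Int × Int) → Int → Int → Int → Int
  | [], switches, _, _ => switches
  | (index, color) :: rest, switches, firstBrush, secondBrush =>
    if firstBrush = 0 then calcAuxA colors rest (switches + 1) color secondBrush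
    else if firstBrush = color then calcAuxA colors rest switches firstBrush secondBrush
    else if secondBrush = 0 then calcAuxA colors rest (switches + 1) firstBrush color
    else if secondBrush = color then calcAuxA colors rest switches firstBrush secondBrush
    else
      let firstBrushDistance := getDistanceFromNextOccurrence index firstBrush colors
      let secondBrushDistance := getDistanceFromNextOccurrence index secondBrush colors
      if firstBrushDistance < secondBrushDistance then
        calcAuxA colors rest (switches + 1) firstBrush color
      else
        calcAuxA colors rest (switches + 1) color secondBrush

def calculate (colors : List Int) : Int :=
  calcAuxA colors (PySem.List.enumerate colors 0) 0 0 0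

-- ===== PORT B =====
-- occ.setdefault(c, []).append(i)  ≡  occ[c] = occ.get(c, []) + [i]  =  Dict.modify c [] (· ++ [i])
def buildOcc (colors : List Int) : PySem.Dict Int (List Int) :=
  (PySem.List.enumerate colors 0).foldl (fun d p => d.modify p.2 [] (· ++ [p.1])) PySem.Dict.empty

-- the hand-written `while lo < hi` binary search of Source B; lo, hi are Python ints kept in
-- 0 ≤ lo ≤ hi ≤ len(lst), so Nat lo/hi, Nat (lo+hi)//2 and plain getD (mid < hi ≤ length) are exact
def lowerBound (lst : List Int) (x : Int) (lo hi : Nat) : Nat :=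
  if _h : lo < hi then
    let mid := (lo + hi) / 2
    if lst.getD mid 0 < x then lowerBound lst x (mid + 1) hi
    else lowerBound lst x lo mid
  else lo
termination_by hi - lo
decreasing_by all_goals omega

-- next_at(i, c): lst[lo] if lo < len(lst) else n  (lo in range, so getD is exact)
def nextAt (occ : PySem.Dict Int (List Int)) (n : Int) (i c : Int) : Int :=
  let lst := occ.getD c []
  let lo := lowerBound lst i 0 lst.length
  if lo < lst.length then lst.getD lo 0 else n

def calcAuxB (occ : PySem.Dict Int (List Int)) (n : Int) : List (Int × Int) → Int → Int → Int → Int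
  | [], switches, _, _ => switches
  | (i, c) :: rest, switches, first, second =>
    if first = 0 then calcAuxB occ n rest (switches + 1) c second
    else if ¬ first = c then
      if second = 0 then calcAuxB occ n rest (switches + 1) first c
      else if ¬ second = c then
        if nextAt occ n i first < nextAt occ n i second then
          calcAuxB occ n rest (switches + 1) first c
        else
          calcAuxB occ n rest (switches + 1) c second
      else calcAuxB occ n rest switches first second
    else calcAuxB occ n rest switches first second

def calculate_alt (colors : List Int) : Int :=
  let n : Int := colors.length
  let occ := buildOcc colors
  calcAuxB occ n (PySem.List.enumerate colors 0) 0 0 0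

-- ===== PRECONDITION & SPEC =====
def Spec_calculate (colors : List Int) (out : Int) : Prop := out = calculate_alt colors
instance (colors : List Int) (out : Int) : Decidable (Spec_calculate colors out) := by unfold Spec_calculate; infer_instance

-- ===== CLAIM (what is proved, stated in full; the proofs are below) =====
def Claim_equal_calculate : Prop := ∀ (colors : List Int), Dom_calculate colors → Spec_calculate colors (calculate colors)

-- ===== LEMMAS AND PROOFS =====

-- the occurrence-index list of colour c, as built by buildOcc
def occList (colors : List Int) (c : Int) : List Int :=
  ((PySem.List.enumerate colors 0).filter (fun p => p.2 == c)).map (·.1)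

theorem buildOcc_getD (colors : List Int) (c : Int) :
    (buildOcc colors).getD c [] = occList colors c := by
  unfold buildOcc occList
  have : (PySem.List.enumerate colors 0).foldl (fun d p => d.modify p.2 [] (· ++ [p.1]))
      (PySem.Dict.empty : PySem.Dict Int (List Int))
      = ((PySem.List.enumerate colors 0).map (fun p => (p.2, p.1))).foldl
          (fun d q => d.modify q.1 [] (· ++ [q.2])) PySem.Dict.empty := by
    rw [List.foldl_map]
  rw [this, PySem.Dict.getD_foldl_modify_append]
  simp [List.filter_map, List.map_map, Function.comp_def]

theorem occList_sorted (colors : List Int) (c : Int) :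
    (occList colors c).Pairwise (· < ·) := by
  unfold occList
  rw [List.pairwise_map]
  exact ((PySem.List.pairwise_lt_enumerate colors 0).filter _).imp (fun h => h)

theorem mem_occList (colors : List Int) (c v : Int) :
    v ∈ occList colors c ↔ ∃ k, ∃ h : k < colors.length, v = (k : Int) ∧ colors[k] = c := by
  unfold occList
  simp only [List.mem_map, List.mem_filter, PySem.List.mem_enumerate_iff]
  constructor
  · rintro ⟨p, ⟨⟨k, hk, rfl⟩, hpc⟩, rfl⟩
    simp only [beq_iff_eq] at hpc
    exact ⟨k, hk, by simp, hpc⟩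
  · rintro ⟨k, hk, rfl, hck⟩
    exact ⟨((k : Int), colors[k]), ⟨⟨k, hk, by simp⟩, by simpa using hck⟩, rfl⟩

-- A-side: once the scan has reached index ≥ current_index it counts hops like findIdx
theorem getDistAux_count (cc : Int) : ∀ (xs : List Int) (s h ci : Int), ci ≤ s →
    getDistAux ci cc (PySem.List.enumerate xs s) h = h + ((xs.findIdx (· == cc) : Nat) : Int) := by
  intro xs
  induction xs with
  | nil => intro s h ci _; simp [getDistAux, PySem.List.enumerate_nil, List.findIdx_nil]
  | cons x xs ih =>
    intro s h ci hle
    rw [PySem.List.enumerate_cons]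
    simp only [getDistAux, if_neg (by omega : ¬ s < ci)]
    by_cases hx : x = cc
    · simp [hx, List.findIdx_cons]
    · rw [if_neg hx, ih (s + 1) (h + 1) ci (by omega), List.findIdx_cons]
      have hb : (x == cc) = false := by simp [hx]
      rw [hb, cond_false]
      push_cast
      ring

-- the scan skips the first k indices, then counts: distance = findIdx of c in colors[k:]
theorem getDistAux_skip (cc : Int) : ∀ (xs : List Int) (k : Nat) (s h : Int),
    getDistAux (s + (k : Int)) cc (PySem.List.enumerate xs s) h
      = h + (((xs.drop k).findIdx (· == cc) : Nat) : Int) := by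
  intro xs
  induction xs with
  | nil => intro k s h; simp [getDistAux, PySem.List.enumerate_nil, List.findIdx_nil]
  | cons x xs ih =>
    intro k s h
    cases k with
    | zero =>
      exact (by simpa using getDistAux_count cc (x :: xs) s h (s + ((0 : Nat) : Int)) (by omega))
    | succ k =>
      rw [PySem.List.enumerate_cons]
      simp only [getDistAux, if_pos (by push_cast; omega : s < s + ((k + 1 : Nat) : Int))]
      have : s + ((k + 1 : Nat) : Int) = (s + 1) + (k : Int) := by push_cast; ring
      rw [this, ih k (s + 1) h, List.drop_succ_cons]

-- A-side characterisation: get_distance_from_next_occurrence k c = findIdx of c in colors[k:]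
theorem getDist_eq (colors : List Int) (cc : Int) (k : Nat) :
    getDistanceFromNextOccurrence (k : Int) cc colors
      = (((colors.drop k).findIdx (· == cc) : Nat) : Int) := by
  have := getDistAux_skip cc colors k 0 0
  simpa [getDistanceFromNextOccurrence] using this

-- binary-search correctness on the (sorted) list, stated with getD
theorem lowerBound_spec (L : List Int) (x : Int)
    (hs : ∀ q r, q < r → r < L.length → L.getD q 0 ≤ L.getD r 0) :
    ∀ lo hi, lo ≤ hi → hi ≤ L.length →
      (∀ q, q < lo → L.getD q 0 < x) →
      (∀ q, hi ≤ q → q < L.length → ¬ L.getD q 0 < x) →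
      lowerBound L x lo hi ≤ L.length ∧
      (∀ q, q < lowerBound L x lo hi → L.getD q 0 < x) ∧
      (∀ q, lowerBound L x lo hi ≤ q → q < L.length → ¬ L.getD q 0 < x) := by
  intro lo hi
  fun_induction lowerBound L x lo hi with
  | case1 lo hi hlt mid hmid ih =>
    intro _ hhi hlo hhi'
    have hd : mid = (lo + hi) / 2 := rfl
    have hmlt : mid < hi := by omega
    have hmlo : lo ≤ mid := by omega
    refine ih (by omega) hhi ?_ hhi'
    intro q hq
    rcases Nat.lt_or_ge q lo with h | h
    · exact hlo q h
    · calc L.getD q 0 ≤ L.getD mid 0 := by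
            rcases Nat.eq_or_lt_of_le (by omega : q ≤ mid) with rfl | h'
            · exact le_refl _
            · exact hs q mid h' (by omega)
          _ < x := hmid
  | case2 lo hi hlt mid hmid ih =>
    intro _ hhi hlo hhi'
    have hd : mid = (lo + hi) / 2 := rfl
    have hmlt : mid < hi := by omega
    have hmlo : lo ≤ mid := by omega
    refine ih (by omega) (by omega) hlo ?_
    intro q hq hql
    have : L.getD mid 0 ≤ L.getD q 0 := by
      rcases Nat.eq_or_lt_of_le hq with rfl | h'
      · exact le_refl _
      · exact hs mid q h' hql
    omega
  | case3 lo hi hnlt =>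
    intro hle hhi hlo hhi'
    exact ⟨by omega, fun q hq => hlo q (by omega), fun q hq hql => hhi' q (by omega) hql⟩

-- B-side = A-side, pointwise: next_at(k, c) = k + distance
-- first index whose entry satisfies p, pinned down by a witness and minimality
theorem findIdx_eq_of {α : Type} (p : α → Bool) (xs : List α) (w : Nat) (hw : w < xs.length)
    (h1 : p xs[w] = true) (h2 : ∀ q (hq : q < w), p (xs[q]'(by omega)) = false) :
    xs.findIdx p = w := by
  rcases Nat.lt_trichotomy (xs.findIdx p) w with h | h | h
  · have ht := List.findIdx_getElem (p := p) (xs := xs) (w := by omega)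
    have hf := h2 _ h
    rw [ht] at hf
    exact absurd hf (by simp)
  · exact h
  · have := List.not_of_lt_findIdx h
    exact Bool.noConfusion (h1.symm.trans this)

theorem nextAt_eq (colors : List Int) (c : Int) (k : Nat) (hk : k ≤ colors.length) :
    nextAt (buildOcc colors) (colors.length : Int) (k : Int) c
      = (k : Int) + (((colors.drop k).findIdx (· == c) : Nat) : Int) := by
  unfold nextAt
  rw [buildOcc_getD]
  set L := occList colors c with hL
  have hsort : L.Pairwise (· < ·) := occList_sorted colors c
  have hstrict := List.pairwise_iff_getElem.mp hsort
  have hs : ∀ q r, q < r → r < L.length → L.getD q 0 ≤ L.getD r 0 := by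
    intro q r hqr hr
    rw [List.getD_eq_getElem L 0 (by omega), List.getD_eq_getElem L 0 hr]
    exact le_of_lt (hstrict q r (by omega) hr hqr)
  obtain ⟨hple, hbelow, habove⟩ :=
    lowerBound_spec L ((k : Nat) : Int) hs 0 L.length (Nat.zero_le _) (le_refl _)
      (by intro q hq; omega) (by intro q hq hql; omega)
  set p := lowerBound L ((k : Nat) : Int) 0 L.length with hp
  by_cases hplt : p < L.length
  · rw [if_pos hplt, List.getD_eq_getElem L 0 hplt]
    obtain ⟨j, hj, hvj, hcj⟩ := (mem_occList colors c L[p]).mp (List.getElem_mem hplt)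
    have hkj : k ≤ j := by
      have := habove p (le_refl p) hplt
      rw [List.getD_eq_getElem L 0 hplt, hvj] at this
      omega
    have hmj : (colors.drop k).findIdx (· == c) = j - k := by
      refine findIdx_eq_of _ _ (j - k) (by simp [List.length_drop]; omega) ?_ ?_
      · have : (colors.drop k)[j - k]'(by simp [List.length_drop]; omega)
            = colors[k + (j - k)]'(by omega) := List.getElem_drop ..
        simp only [this]
        have : k + (j - k) = j := by omega
        simp [this, hcj]
      · intro q hq
        have hlt : k + q < j := by omega
        have hget : (colors.drop k)[q]'(by simp [List.length_drop]; omega)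
            = colors[k + q]'(by omega) := List.getElem_drop ..
        rw [hget]
        by_contra hne
        have hcq : colors[k + q]'(by omega) = c := by
          simpa using hne
        have hmemL : ((k + q : Nat) : Int) ∈ L :=
          (mem_occList colors c _).mpr ⟨k + q, by omega, rfl, hcq⟩
        obtain ⟨r, hr, hrL⟩ := List.mem_iff_getElem.mp hmemL
        rcases Nat.lt_or_ge r p with hrp | hrp
        · have := hbelow r hrp
          rw [List.getD_eq_getElem L 0 hr, hrL] at this
          omega
        · rcases Nat.eq_or_lt_of_le hrp with rfl | hrp'
          · rw [hrL] at hvj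
            omega
          · have := hstrict p r hplt hr hrp'
            rw [hrL, hvj] at this
            omega
    rw [hvj, hmj]
    omega
  · rw [if_neg hplt]
    have hall : ∀ x ∈ colors.drop k, (x == c) = false := by
      intro x hx
      obtain ⟨i, hi, hxi⟩ := List.mem_iff_getElem.mp hx
      by_contra hne
      have hxc : x = c := by
        have : (x == c) = true := by
          cases hb : (x == c) with
          | true => rfl
          | false => exact absurd hb hne
        simpa using this
      have hget : (colors.drop k)[i]'hi = colors[k + i]'(by
          have := List.length_drop (l := colors) (i := k); omega) := List.getElem_drop ..
      have hmemL : ((k + i : Nat) : Int) ∈ L := by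
        refine (mem_occList colors c _).mpr ⟨k + i, by
          have := List.length_drop (l := colors) (i := k); omega, rfl, ?_⟩
        rw [← hget, hxi, hxc]
      obtain ⟨r, hr, hrL⟩ := List.mem_iff_getElem.mp hmemL
      have := hbelow r (by omega)
      rw [List.getD_eq_getElem L 0 hr, hrL] at this
      omega
    have hm : (colors.drop k).findIdx (· == c) = (colors.drop k).length :=
      List.findIdx_eq_length.mpr hall
    rw [hm, List.length_drop]
    omega

theorem calcAux_eq (colors : List Int) :
    ∀ ps : List (Int × Int), (∀ p ∈ ps, ∃ k : Nat, k < colors.length ∧ p.1 = (k : Int)) →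
    ∀ s f sec, calcAuxA colors ps s f sec
      = calcAuxB (buildOcc colors) (colors.length : Int) ps s f sec := by
  intro ps
  induction ps with
  | nil => intro _ s f sec; rfl
  | cons p rest ih =>
    intro hps s f sec
    obtain ⟨i, c⟩ := p
    obtain ⟨k, hk, hik⟩ := hps (i, c) List.mem_cons_self
    have hrest := fun q hq => ih (fun r hr => hps r (List.mem_cons_of_mem _ hr)) q hq
    simp only at hik
    subst hik
    simp only [calcAuxA, calcAuxB]
    by_cases h1 : f = 0
    · rw [if_pos h1, if_pos h1, hrest]
    · rw [if_neg h1, if_neg h1]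
      by_cases h2 : f = c
      · rw [if_pos h2, if_neg (fun hn => hn h2), hrest]
      · rw [if_neg h2, if_pos h2]
        by_cases h3 : sec = 0
        · rw [if_pos h3, if_pos h3, hrest]
        · rw [if_neg h3, if_neg h3]
          by_cases h4 : sec = c
          · rw [if_pos h4, if_neg (fun hn => hn h4), hrest]
          · rw [if_neg h4, if_pos h4]
            have hkle : k ≤ colors.length := le_of_lt hk
            have hA1 := getDist_eq colors f k
            have hA2 := getDist_eq colors sec k
            have hB1 := nextAt_eq colors f k hkle
            have hB2 := nextAt_eq colors sec k hkle
            by_cases h5 : getDistanceFromNextOccurrence ((k : Nat) : Int) f colors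
                < getDistanceFromNextOccurrence ((k : Nat) : Int) sec colors
            · rw [if_pos h5, if_pos (by rw [hB1, hB2]; rw [hA1, hA2] at h5; omega), hrest]
            · rw [if_neg h5, if_neg (by rw [hB1, hB2]; rw [hA1, hA2] at h5; omega), hrest]

-- ===== VERDICT (by name: the statement is the Claim_ definition above) =====
theorem calculate_spec : Claim_equal_calculate := by
  intro colors _
  unfold Spec_calculate calculate calculate_alt
  exact calcAux_eq colors _ (by
    intro p hp
    rw [PySem.List.mem_enumerate_iff] at hp
    obtain ⟨k, hk, rfl⟩ := hp
    exact ⟨k, hk, by simp⟩) 0 0 0
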